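-- pv_equiv track=rewrite | github.com/haochuanwei/Project_Euler | subroutines.py | block_tiling_multifixed_1d
-- ===== SOURCE A (Python) =====
-- def block_tiling_multifixed_1d(m_values, n):
--     """
--     Compute the number of ways to tile n black blocks with red paint.
--     Each group of red paint must cover exactly m consecutive blocks where m has multiple choices.
--     """
--     m_values = sorted(m_values)
--     m_min = m_values[0]
--     end_in_red_end = [*[0 for _ in range(m_min - 1)], 1]
--     end_in_black = [1 for _ in range(m_min)]
--
--     for i in range(m_min, n):
--         _reds, _blacks = 0, 0
--         for _m in m_values:
--             if i < _m - 1: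
--                 pass
--             elif i == _m - 1:
--                 _reds += 1
--             else:
--                 _reds += end_in_red_end[i - _m] + end_in_black[i - _m]
--         _blacks = end_in_red_end[i - 1] + end_in_black[i - 1]
--         end_in_red_end.append(_reds)
--         end_in_black.append(_blacks)
--
--     return end_in_red_end, end_in_black
-- ===== SOURCE B (Python) =====
-- def block_tiling_multifixed_1d(m_values, n):
--     """Single-array DP: f[j] = number of tilings of j blocks (f[0]=1 sentinel,
--     f[m_min]=2: all black, or one minimal red tile); reconstruct both output
--     arrays from f."""
--     ms = sorted(m_values)
--     m_min = ms[0]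
--     length = max(n, m_min)
--     f = [1] * m_min + [2]
--     for j in range(m_min + 1, length + 1):
--         f.append(f[-1] + sum(f[j - m] for m in ms if m <= j))
--     red = [f[i + 1] - f[i] for i in range(length)]
--     return red, f[:length]
-- ===== Notes on version B (the rewrite author's own statement) =====
-- stated objective: simpler
-- what changed: Replaces the two parallel DP arrays and the three-way branch by a single total-count sequence f (f[0..m_min-1]=1, f[m_min]=2, uniform recurrence f[j]=f[j-1]+sum(f[j-m] for m<=j)), reconstructing both returned arrays from f by adjacent differences and a slice.
-- outside the precondition, e.g. on block_tiling_multifixed_1d([-1], -5): A returns ([1], []), B returns ([], [])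
import Mathlib
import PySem

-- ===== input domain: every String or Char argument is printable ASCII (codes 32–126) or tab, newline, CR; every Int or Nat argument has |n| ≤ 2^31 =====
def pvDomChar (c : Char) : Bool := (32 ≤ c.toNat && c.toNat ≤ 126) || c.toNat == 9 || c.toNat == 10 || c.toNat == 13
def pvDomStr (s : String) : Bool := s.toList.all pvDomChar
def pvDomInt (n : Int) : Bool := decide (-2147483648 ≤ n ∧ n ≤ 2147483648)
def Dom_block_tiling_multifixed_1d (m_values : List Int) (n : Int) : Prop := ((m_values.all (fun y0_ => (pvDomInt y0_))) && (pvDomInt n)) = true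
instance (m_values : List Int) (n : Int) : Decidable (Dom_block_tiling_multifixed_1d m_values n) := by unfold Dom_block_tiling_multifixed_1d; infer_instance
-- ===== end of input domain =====

-- B replaces A's two parallel DP arrays by one total-count sequence rebuilt into both outputs (objective: simpler).

-- ===== PORT A =====
-- loop body of A's 'for i in range(m_min, n)'; list indexing via pyGetD (in range on every admitted input)
def pvStepA (ms : List Int) (st : List Int × List Int) (i : Int) : List Int × List Int :=
  let reds := ms.foldl (fun acc m =>
      if i < m - 1 then acc
      else if i = m - 1 then acc + 1
      else acc + (PySem.List.pyGetD st.1 (i - m) 0 + PySem.List.pyGetD st.2 (i - m) 0)) 0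
  let blacks := PySem.List.pyGetD st.1 (i - 1) 0 + PySem.List.pyGetD st.2 (i - 1) 0
  (st.1 ++ [reds], st.2 ++ [blacks])

def block_tiling_multifixed_1d (m_values : List Int) (n : Int) : List Int × List Int :=
  let ms := PySem.List.sorted m_values (fun x => x) false
  let m_min := PySem.List.pyGetD ms 0 0   -- ms[0]; IndexError on empty m_values, excluded by Pre_
  let red0 := (PySem.List.pyRange 0 (m_min - 1) 1).map (fun _ => (0 : Int)) ++ [1]
  let black0 := (PySem.List.pyRange 0 m_min 1).map (fun _ => (1 : Int))
  (PySem.List.pyRange m_min n 1).foldl (pvStepA ms) (red0, black0)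

-- ===== PORT B =====
-- loop body of B's 'for j in range(m_min+1, length+1)': f.append(f[-1] + sum(f[j-m] for m in ms if m <= j))
def pvStepB (ms : List Int) (f : List Int) (j : Int) : List Int :=
  f ++ [PySem.List.pyGetD f (-1) 0 +
        ms.foldl (fun s m => if m ≤ j then s + PySem.List.pyGetD f (j - m) 0 else s) 0]

def block_tiling_multifixed_1d_alt (m_values : List Int) (n : Int) : List Int × List Int :=
  let ms := PySem.List.sorted m_values (fun x => x) false
  let m_min := PySem.List.pyGetD ms 0 0   -- ms[0]; IndexError on empty m_values, excluded by Pre_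
  let length := max n m_min
  let f0 := PySem.List.pyRepeat [(1 : Int)] m_min ++ [2]
  let f := (PySem.List.pyRange (m_min + 1) (length + 1) 1).foldl (pvStepB ms) f0
  let red := (PySem.List.pyRange 0 length 1).map
      (fun i => PySem.List.pyGetD f (i + 1) 0 - PySem.List.pyGetD f i 0)
  (red, PySem.List.slice f none (some length))

-- ===== PRECONDITION & SPEC =====
-- Pre_ excludes empty m_values (IndexError in A) and non-positive tile lengths, which lie outside the
-- task's natural domain: A raises IndexError on them except when n ≤ m_min, where it returns the
-- degenerate initial fragment (see cites in claim.json).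
def Pre_block_tiling_multifixed_1d (m_values : List Int) (n : Int) : Prop :=
  m_values ≠ [] ∧ ∀ m ∈ m_values, 1 ≤ m
instance (m_values : List Int) (n : Int) : Decidable (Pre_block_tiling_multifixed_1d m_values n) := by
  unfold Pre_block_tiling_multifixed_1d; infer_instance

def pvWitness_block_tiling_multifixed_1d : List Int × Int := ([3, 2], 7)

def Spec_block_tiling_multifixed_1d (m_values : List Int) (n : Int) (out : List Int × List Int) : Prop :=
  out = block_tiling_multifixed_1d_alt m_values n
instance (m_values : List Int) (n : Int) (out : List Int × List Int) : Decidable (Spec_block_tiling_multifixed_1d m_values n out) := by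
  unfold Spec_block_tiling_multifixed_1d; infer_instance

-- ===== CLAIM (what is proved, stated in full; the proofs are below) =====
def Claim_equal_block_tiling_multifixed_1d : Prop :=
  ∀ (m_values : List Int) (n : Int), Dom_block_tiling_multifixed_1d m_values n →
    Pre_block_tiling_multifixed_1d m_values n →
    Spec_block_tiling_multifixed_1d m_values n (block_tiling_multifixed_1d m_values n)

-- ===== LEMMAS AND PROOFS =====

-- the common mathematical sequence: pvF ms m0 j = the number both programs assign to a row of j blocks
def pvF (ms : List Int) (m0 : Int) : Nat → Int
  | 0 => 1
  | j + 1 =>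
    if ((j : Int) + 1) < m0 then 1
    else if ((j : Int) + 1) = m0 then 2
    else pvF ms m0 j +
      (ms.map (fun m => if h : 1 ≤ m ∧ m ≤ (j : Int) + 1 then pvF ms m0 (j + 1 - m.toNat) else 0)).sum
termination_by j => j
decreasing_by
  · omega
  · omega

lemma pvF_one (ms : List Int) (m0 : Int) (j : Nat) (h : (j : Int) < m0) : pvF ms m0 j = 1 := by
  cases j with
  | zero => rw [pvF]
  | succ j => rw [pvF, if_pos (show ((j:Int)+1) < m0 by push_cast at h; omega)]

lemma pvF_two (ms : List Int) (m0 : Int) (j : Nat) (h : (j : Int) = m0) (h1 : 1 ≤ m0) :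
    pvF ms m0 j = 2 := by
  cases j with
  | zero => omega
  | succ j =>
    rw [pvF, if_neg (by push_cast at h; omega), if_pos (by push_cast at h; omega)]

lemma pvF_step (ms : List Int) (m0 : Int) (j : Nat) (h : m0 < (j : Int) + 1) :
    pvF ms m0 (j + 1) = pvF ms m0 j +
      (ms.map (fun m => if 1 ≤ m ∧ m ≤ (j : Int) + 1 then pvF ms m0 (j + 1 - m.toNat) else 0)).sum := by
  rw [pvF, if_neg (by omega), if_neg (by omega)]
  simp only [dite_eq_ite]

lemma pv_stepB_eq (ms : List Int) (hms : ∀ m ∈ ms, 1 ≤ m) (m0 : Int) (j : Nat)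
    (hM : m0 < (j : Int) + 1) :
    pvStepB ms ((List.range (j+1)).map (pvF ms m0)) ((j : Int) + 1)
      = (List.range (j + 2)).map (pvF ms m0) := by
  unfold pvStepB
  have hlen : ((List.range (j+1)).map (pvF ms m0)).length = j + 1 := by simp
  have hne : (List.range (j+1)).map (pvF ms m0) ≠ [] := by
    intro h; rw [h] at hlen; simp at hlen
  rw [PySem.List.pyGetD_neg_one _ _ hne, List.getLast_eq_getElem]
  have hcong : List.foldl
        (fun s m => if m ≤ (j:Int) + 1 then s + PySem.List.pyGetD ((List.range (j+1)).map (pvF ms m0)) ((j:Int) + 1 - m) 0 else s)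
        0 ms
      = List.foldl (fun s m => s + (if 1 ≤ m ∧ m ≤ (j : Int) + 1 then pvF ms m0 (j + 1 - m.toNat) else 0)) 0 ms := by
    apply PySem.List.foldl_congr_mem
    intro acc m hm
    have h1 : 1 ≤ m := hms m hm
    by_cases hle : m ≤ (j : Int) + 1
    · rw [if_pos hle, if_pos ⟨h1, hle⟩]
      congr 1
      rw [PySem.List.pyGetD_eq_getElem _ _ (by omega) (by simp; push_cast; omega)]
      rw [List.getElem_map, List.getElem_range]
      congr 1
      omega
    · rw [if_neg hle, if_neg (by tauto)]; ring
  rw [hcong]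
  rw [PySem.List.foldl_add]
  have hlast : ((List.range (j+1)).map (pvF ms m0))[((List.range (j+1)).map (pvF ms m0)).length - 1]
      = pvF ms m0 j := by
    simp
  rw [hlast]
  have hr : (List.range (j+2)).map (pvF ms m0)
      = (List.range (j+1)).map (pvF ms m0) ++ [pvF ms m0 (j+1)] := by
    rw [show j + 2 = (j+1) + 1 from rfl, List.range_succ, List.map_append, List.map_singleton]
  rw [hr]
  congr 1
  rw [pvF_step ms m0 j hM]
  simp

lemma pv_f0_eq (ms : List Int) (m0 : Int) (h0 : 1 ≤ m0) :
    PySem.List.pyRepeat [(1 : Int)] m0 ++ [2] = (List.range (m0.toNat + 1)).map (pvF ms m0) := by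
  rw [PySem.List.pyRepeat_singleton, List.range_succ, List.map_append, List.map_singleton]
  congr 1
  · symm
    rw [List.eq_replicate_iff]
    refine ⟨by simp, ?_⟩
    intro b hb
    simp only [List.mem_map, List.mem_range] at hb
    obtain ⟨i, hi, rfl⟩ := hb
    exact pvF_one ms m0 i (by omega)
  · rw [pvF_two ms m0 m0.toNat (by omega) h0]

lemma pv_foldB (ms : List Int) (hms : ∀ m ∈ ms, 1 ≤ m) (m0 : Int) (h0 : 1 ≤ m0) (k : Nat) :
    (PySem.List.pyRange (m0 + 1) (m0 + 1 + (k : Int)) 1).foldl (pvStepB ms)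
      (PySem.List.pyRepeat [(1 : Int)] m0 ++ [2])
    = (List.range (m0.toNat + 1 + k)).map (pvF ms m0) := by
  induction k with
  | zero =>
    rw [show m0 + 1 + ((0:Nat):Int) = m0 + 1 by push_cast; ring,
        PySem.List.pyRange_one_eq_nil (le_refl _), List.foldl_nil]
    exact pv_f0_eq ms m0 h0
  | succ k ih =>
    rw [show m0 + 1 + ((k+1:Nat):Int) = (m0 + 1 + (k:Int)) + 1 by push_cast; ring,
        PySem.List.pyRange_one_succ_right (by omega), List.foldl_append, ih, List.foldl_cons,
        List.foldl_nil]
    have hj : m0 + 1 + (k:Int) = ((m0.toNat + k : Nat) : Int) + 1 := by push_cast; omega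
    rw [hj, show m0.toNat + 1 + k = (m0.toNat + k) + 1 by omega,
        pv_stepB_eq ms hms m0 (m0.toNat + k) (by push_cast; omega),
        show (m0.toNat + k) + 2 = m0.toNat + 1 + (k+1) by omega]

lemma pv_stepA_eq (ms : List Int) (hms : ∀ m ∈ ms, 1 ≤ m) (m0 : Int) (P : Nat)
    (hP : m0 ≤ (P : Int)) (h1P : 1 ≤ P) (hm0 : 1 ≤ m0) :
    pvStepA ms
      ((List.range P).map (fun i => pvF ms m0 (i+1) - pvF ms m0 i), (List.range P).map (pvF ms m0))
      ((P : Int))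
    = ((List.range (P+1)).map (fun i => pvF ms m0 (i+1) - pvF ms m0 i),
       (List.range (P+1)).map (pvF ms m0)) := by
  unfold pvStepA
  have hlr : ((List.range P).map (fun i => pvF ms m0 (i+1) - pvF ms m0 i)).length = P := by simp
  have hlb : ((List.range P).map (pvF ms m0)).length = P := by simp
  have hblacks : PySem.List.pyGetD ((List.range P).map (fun i => pvF ms m0 (i+1) - pvF ms m0 i)) ((P:Int) - 1) 0
      + PySem.List.pyGetD ((List.range P).map (pvF ms m0)) ((P:Int) - 1) 0 = pvF ms m0 P := by
    rw [PySem.List.pyGetD_eq_getElem _ _ (by omega) (by simp only [List.length_map, List.length_range]; omega),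
        PySem.List.pyGetD_eq_getElem _ _ (by omega) (by simp only [List.length_map, List.length_range]; omega)]
    simp only [List.getElem_map, List.getElem_range]
    rw [show ((P:Int) - 1).toNat + 1 = P by omega]
    ring
  have hcong : List.foldl (fun acc m =>
        if (P:Int) < m - 1 then acc
        else if (P:Int) = m - 1 then acc + 1
        else acc + (PySem.List.pyGetD ((List.range P).map (fun i => pvF ms m0 (i+1) - pvF ms m0 i)) ((P:Int) - m) 0
                  + PySem.List.pyGetD ((List.range P).map (pvF ms m0)) ((P:Int) - m) 0)) 0 ms
      = List.foldl (fun acc m => acc + (if 1 ≤ m ∧ m ≤ (P : Int) + 1 then pvF ms m0 (P + 1 - m.toNat) else 0)) 0 ms := by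
    apply PySem.List.foldl_congr_mem
    intro acc m hm
    have h1 : 1 ≤ m := hms m hm
    rcases lt_trichotomy (P:Int) (m - 1) with hc | hc | hc
    · rw [if_pos hc, if_neg (by omega)]; ring
    · rw [if_neg (by omega), if_pos hc, if_pos (by omega)]
      have : P + 1 - m.toNat = 0 := by omega
      rw [this, pvF]
    · rw [if_neg (by omega), if_neg (by omega), if_pos (by omega)]
      congr 1
      rw [PySem.List.pyGetD_eq_getElem _ _ (by omega) (by simp only [List.length_map, List.length_range]; omega),
          PySem.List.pyGetD_eq_getElem _ _ (by omega) (by simp only [List.length_map, List.length_range]; omega)]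
      simp only [List.getElem_map, List.getElem_range]
      rw [show P + 1 - m.toNat = ((P:Int) - m).toNat + 1 by omega]
      ring
  rw [hblacks, hcong, PySem.List.foldl_add]
  have hsum : (0:Int) + (List.map (fun m => if 1 ≤ m ∧ m ≤ (P : Int) + 1 then pvF ms m0 (P + 1 - m.toNat) else 0) ms).sum
      = pvF ms m0 (P+1) - pvF ms m0 P := by
    rw [pvF_step ms m0 P (by omega)]; ring
  rw [hsum]
  dsimp only
  rw [Prod.mk.injEq]
  constructor <;> rw [List.range_succ, List.map_append, List.map_singleton]

lemma pv_init_red (ms : List Int) (m0 : Int) (h0 : 1 ≤ m0) :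
    (PySem.List.pyRange 0 (m0 - 1) 1).map (fun _ => (0 : Int)) ++ [1]
      = (List.range m0.toNat).map (fun i => pvF ms m0 (i+1) - pvF ms m0 i) := by
  obtain ⟨t, ht⟩ : ∃ t, m0.toNat = t + 1 := ⟨m0.toNat - 1, by omega⟩
  rw [ht, List.range_succ, List.map_append, List.map_singleton]
  congr 1
  · have hl : ((PySem.List.pyRange 0 (m0 - 1) 1).map (fun _ => (0:Int))).length = t := by
      simp [PySem.List.length_pyRange_one]; omega
    have h2 : (PySem.List.pyRange 0 (m0 - 1) 1).map (fun _ => (0 : Int)) = List.replicate t 0 := by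
      rw [List.eq_replicate_iff]
      refine ⟨hl, ?_⟩
      intro b hb
      simp only [List.mem_map] at hb
      obtain ⟨_, _, rfl⟩ := hb
      rfl
    rw [h2]
    symm
    rw [List.eq_replicate_iff]
    refine ⟨by simp, ?_⟩
    intro b hb
    simp only [List.mem_map, List.mem_range] at hb
    obtain ⟨i, hi, rfl⟩ := hb
    rw [pvF_one ms m0 (i+1) (by push_cast; omega), pvF_one ms m0 i (by push_cast; omega)]
    ring
  · rw [pvF_one ms m0 t (by omega), pvF_two ms m0 (t+1) (by push_cast; omega) h0]
    norm_num

lemma pv_init_black (ms : List Int) (m0 : Int) :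
    (PySem.List.pyRange 0 m0 1).map (fun _ => (1 : Int)) = (List.range m0.toNat).map (pvF ms m0) := by
  have h2 : (PySem.List.pyRange 0 m0 1).map (fun _ => (1 : Int)) = List.replicate m0.toNat 1 := by
    rw [List.eq_replicate_iff]
    refine ⟨by simp [PySem.List.length_pyRange_one], ?_⟩
    intro b hb
    simp only [List.mem_map] at hb
    obtain ⟨_, _, rfl⟩ := hb
    rfl
  rw [h2]
  symm
  rw [List.eq_replicate_iff]
  refine ⟨by simp, ?_⟩
  intro b hb
  simp only [List.mem_map, List.mem_range] at hb
  obtain ⟨i, hi, rfl⟩ := hb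
  exact pvF_one ms m0 i (by omega)

lemma pv_foldA (ms : List Int) (hms : ∀ m ∈ ms, 1 ≤ m) (m0 : Int) (h0 : 1 ≤ m0) (k : Nat) :
    (PySem.List.pyRange m0 (m0 + (k : Int)) 1).foldl (pvStepA ms)
      ((PySem.List.pyRange 0 (m0 - 1) 1).map (fun _ => (0 : Int)) ++ [1],
       (PySem.List.pyRange 0 m0 1).map (fun _ => (1 : Int)))
    = ((List.range (m0.toNat + k)).map (fun i => pvF ms m0 (i+1) - pvF ms m0 i),
       (List.range (m0.toNat + k)).map (pvF ms m0)) := by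
  induction k with
  | zero =>
    rw [show m0 + ((0:Nat):Int) = m0 by push_cast; ring,
        PySem.List.pyRange_one_eq_nil (le_refl _), List.foldl_nil, Prod.mk.injEq]
    exact ⟨pv_init_red ms m0 h0, pv_init_black ms m0⟩
  | succ k ih =>
    rw [show m0 + ((k+1:Nat):Int) = (m0 + (k:Int)) + 1 by push_cast; ring,
        PySem.List.pyRange_one_succ_right (by omega), List.foldl_append, ih, List.foldl_cons,
        List.foldl_nil]
    have hj : m0 + (k:Int) = ((m0.toNat + k : Nat) : Int) := by push_cast; omega
    rw [hj, show m0.toNat + (k+1) = (m0.toNat + k) + 1 by omega]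
    exact pv_stepA_eq ms hms m0 (m0.toNat + k) (by push_cast; omega) (by omega) h0

lemma pv_main_eq (m_values : List Int) (n : Int)
    (hne : m_values ≠ []) (hall : ∀ m ∈ m_values, 1 ≤ m) :
    block_tiling_multifixed_1d m_values n = block_tiling_multifixed_1d_alt m_values n := by
  obtain ⟨x, t, hxt⟩ : ∃ x t, PySem.List.sorted m_values (fun x => x) false = x :: t := by
    cases h : PySem.List.sorted m_values (fun x => x) false with
    | nil => exact absurd ((PySem.List.sorted_eq_nil_iff m_values _ false).1 h) hne
    | cons a b => exact ⟨a, b, rfl⟩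
  have hall' : ∀ m ∈ (x :: t), 1 ≤ m := by
    intro m hm
    exact hall m ((PySem.List.sorted_perm m_values (fun x => x) false).mem_iff.1 (hxt ▸ hm))
  have h0 : 1 ≤ x := hall' x List.mem_cons_self
  simp only [block_tiling_multifixed_1d, block_tiling_multifixed_1d_alt, hxt,
    PySem.List.pyGetD_zero_cons]
  set k := (n - x).toNat with hk
  set P := x.toNat + k with hP
  have hrA : PySem.List.pyRange x n 1 = PySem.List.pyRange x (x + (k : Int)) 1 := by
    by_cases h : x ≤ n
    · congr 1; omega
    · rw [PySem.List.pyRange_one_eq_nil (by omega), PySem.List.pyRange_one_eq_nil (by omega)]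
  have hrB : PySem.List.pyRange (x + 1) (max n x + 1) 1
      = PySem.List.pyRange (x + 1) (x + 1 + (k : Int)) 1 := by
    congr 1; omega
  rw [hrA, hrB, pv_foldA (x :: t) hall' x h0 k, pv_foldB (x :: t) hall' x h0 k]
  have hL : max n x = ((P : Nat) : Int) := by simp only [hP, hk]; push_cast; omega
  have hP1 : x.toNat + 1 + k = P + 1 := by omega
  rw [hL, hP1, Prod.mk.injEq]
  constructor
  · rw [PySem.List.pyRange_one]
    simp only [List.map_map]
    symm
    apply List.map_congr_left
    intro i hi
    simp only [List.mem_range] at hi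
    simp only [Function.comp_apply, zero_add]
    rw [show ((i:Int) + 1) = ((i+1 : Nat) : Int) by push_cast; ring,
        PySem.List.pyGetD_natCast, PySem.List.pyGetD_natCast,
        PySem.List.getD_map_range _ _ _ _ (by omega), PySem.List.getD_map_range _ _ _ _ (by omega)]
  · rw [PySem.List.slice_to_natCast, ← List.map_take, List.take_range, min_eq_left (by omega)]

-- ===== VERDICT (by name: the statement is the Claim_ definition above) =====
theorem block_tiling_multifixed_1d_spec : Claim_equal_block_tiling_multifixed_1d := by
  intro m_values n _ hpre
  exact pv_main_eq m_values n hpre.1 hpre.2
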